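-- pv_equiv track=rewrite | github.com/julianscp/algoritmosClonado | Seguimiento1/longitudtitulo.py | split_bib_entries
-- ===== SOURCE A (Python) =====
-- def split_bib_entries(text: str) -> list[str]:
--     entries = []
--     i = 0
--     n = len(text)
--     while i < n:
--         at = text.find('@', i)
--         if at == -1: break
--         lb = text.find('{', at)
--         if lb == -1: break
--         depth = 1; j = lb + 1
--         while j < n and depth > 0:
--             c = text[j]
--             if c == '{': depth += 1
--             elif c == '}': depth -= 1
--             j += 1
--         entry = text[at:j]
--         if entry:
--             if not entry.endswith("\n\n"):
--                 entry = entry.rstrip() + "\n\n"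
--             entries.append(entry)
--         i = j
--     return entries
-- ===== SOURCE B (Python) =====
-- def _norm(e: str) -> str:
--     return e if e.endswith("\n\n") else e.rstrip() + "\n\n"
--
--
-- def split_bib_entries(text: str) -> list[str]:
--     entries = []
--     buf = []
--     depth = 0
--     state = 0  # 0: searching '@', 1: after '@' before '{', 2: inside braces
--     for c in text:
--         if state == 0:
--             if c == '@':
--                 buf = [c]
--                 state = 1
--         elif state == 1:
--             buf.append(c)
--             if c == '{':
--                 depth = 1
--                 state = 2
--         else:
--             buf.append(c)
--             if c == '{':
--                 depth += 1
--             elif c == '}':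
--                 depth -= 1
--                 if depth == 0:
--                     entries.append(_norm(''.join(buf)))
--                     state = 0
--     if state == 2:
--         entries.append(_norm(''.join(buf)))
--     return entries
-- ===== Notes on version B (the rewrite author's own statement) =====
-- stated objective: alternative
-- what changed: Replaced A's outer loop of str.find calls (entry marker, then opening brace) plus an inner index-based brace counter and slicing by a single flat character-by-character state machine (searching / after-marker / inside-braces) that accumulates the current entry in a buffer.
import Mathlib
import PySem

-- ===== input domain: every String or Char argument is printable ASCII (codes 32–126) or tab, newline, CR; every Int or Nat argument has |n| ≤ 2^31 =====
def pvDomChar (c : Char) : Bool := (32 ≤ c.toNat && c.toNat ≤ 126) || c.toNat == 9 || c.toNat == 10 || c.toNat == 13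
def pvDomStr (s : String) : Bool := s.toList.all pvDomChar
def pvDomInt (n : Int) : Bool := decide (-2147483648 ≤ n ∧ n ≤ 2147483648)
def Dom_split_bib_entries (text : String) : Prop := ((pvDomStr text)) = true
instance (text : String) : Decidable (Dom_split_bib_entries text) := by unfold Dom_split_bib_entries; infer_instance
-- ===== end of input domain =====

-- B replaces A's find-and-slice outer loop (str.find for '@' and '{' plus an inner
-- index-based brace counter and slicing) by a single flat character-by-character state
-- machine that accumulates the current entry; alternative decomposition, same O(n) cost.

-- ===== PORT A =====
-- entry-normalization of A: if not entry.endswith("\n\n"): entry = entry.rstrip() + "\n\n"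
def aNorm (entry : List Char) : List Char :=
  if ¬ (PySem.Chars.endswith entry ['\n', '\n'] = true) then
    PySem.Chars.rstrip entry ++ ['\n', '\n']
  else entry

-- A's inner 'while j < n and depth > 0' loop; returns the final j.
-- text[j] is ported as pyGetD (the guard gives j < n, so the access is exact).
def aInner (cs : List Char) (n j : Nat) (depth : Int) : Nat :=
  if _h : j < n ∧ 0 < depth then
    let c := PySem.List.pyGetD cs (j : Int) ' '
    let depth' := if c = '{' then depth + 1 else if c = '}' then depth - 1 else depth
    aInner cs n (j + 1) depth'
  else j
termination_by n - j

-- needed by aLoop's termination proof (the final j never moves left)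
theorem aInner_ge (cs : List Char) (n j : Nat) (depth : Int) : j ≤ aInner cs n j depth := by
  unfold aInner
  split
  · exact le_trans (Nat.le_succ j) (aInner_ge cs n (j + 1) _)
  · exact le_refl j
termination_by n - j

-- A's outer 'while i < n' loop, with the entries accumulator.
def aLoop (cs : List Char) (i : Nat) (entries : List (List Char)) : List (List Char) :=
  if hi : i < cs.length then
    let at_ := PySem.Chars.findFrom cs ['@'] (i : Int)
    if hat : at_ = -1 then entries
    else
      let lb := PySem.Chars.findFrom cs ['{'] at_
      if hlb : lb = -1 then entries
      else
        let j := aInner cs cs.length (lb.toNat + 1) 1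
        let entry := PySem.List.slice cs (some at_) (some (j : Int))
        let entries' := if entry = [] then entries else entries ++ [aNorm entry]
        aLoop cs j entries'
  else entries
termination_by cs.length - i
decreasing_by
  show cs.length - aInner cs cs.length (lb.toNat + 1) 1 < cs.length - i
  have h1 := (PySem.Chars.findFrom_natCast_spec cs ['@'] i (le_of_lt hi) hat).1
  have h2 := (PySem.Chars.findFrom_natCast_spec cs ['@'] i (le_of_lt hi) hat).2.1
  -- '@' occurs at index at_, so at_.toNat < cs.length
  have hat0 : 0 ≤ at_ := le_trans (by exact_mod_cast Nat.zero_le i) h1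
  have hlen : at_.toNat < cs.length := by
    rcases h2 with ⟨t, ht⟩
    have : (cs.drop at_.toNat).length ≠ 0 := by
      rw [← ht]; simp
    have := List.length_drop (l := cs) (i := at_.toNat) ▸ this
    omega
  have hcast : ((at_.toNat : Nat) : Int) = at_ := Int.toNat_of_nonneg hat0
  have h3 := (PySem.Chars.findFrom_natCast_spec cs ['{'] at_.toNat (le_of_lt hlen)
      (by rw [hcast]; exact hlb)).1
  rw [hcast] at h3
  have hia : i ≤ at_.toNat := by omega
  have hal : at_.toNat ≤ lb.toNat := by omega
  have hj : lb.toNat + 1 ≤ aInner cs cs.length (lb.toNat + 1) 1 :=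
    aInner_ge cs cs.length (lb.toNat + 1) 1
  omega

def split_bib_entries (text : String) : List String :=
  (aLoop text.toList 0 []).map (fun e => String.ofList e)

-- ===== PORT B =====
-- _norm of Source B
def bNorm (e : List Char) : List Char :=
  if PySem.Chars.endswith e ['\n', '\n'] = true then e
  else PySem.Chars.rstrip e ++ ['\n', '\n']

-- one step of Source B's for-loop; state = (entries, buf, depth, state)
-- (Source B's 'buf = []' sentinel while searching is the empty list here)
def bStep (s : List (List Char) × List Char × Int × Nat) (c : Char) :
    List (List Char) × List Char × Int × Nat :=
  let (es, buf, depth, st) := s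
  if st = 0 then
    if c = '@' then (es, [c], depth, 1) else (es, buf, depth, st)
  else if st = 1 then
    let buf' := buf ++ [c]
    if c = '{' then (es, buf', 1, 2) else (es, buf', depth, 1)
  else
    let buf' := buf ++ [c]
    if c = '{' then (es, buf', depth + 1, 2)
    else if c = '}' then
      let depth' := depth - 1
      if depth' = 0 then (es ++ [bNorm buf'], buf', depth', 0)
      else (es, buf', depth', 2)
    else (es, buf', depth, 2)

def split_bib_entries_alt (text : String) : List String :=
  let s := text.toList.foldl bStep ([], [], 0, 0)
  (if s.2.2.2 = 2 then s.1 ++ [bNorm s.2.1] else s.1).map (fun e => String.ofList e)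

-- ===== PRECONDITION & SPEC =====
def Spec_split_bib_entries (text : String) (out : List String) : Prop := out = split_bib_entries_alt text
instance (text : String) (out : List String) : Decidable (Spec_split_bib_entries text out) := by unfold Spec_split_bib_entries; infer_instance

-- ===== CLAIM (what is proved, stated in full; the proofs are below) =====
def Claim_equal_split_bib_entries : Prop := ∀ (text : String), Dom_split_bib_entries text → Spec_split_bib_entries text (split_bib_entries text)

-- ===== LEMMAS AND PROOFS =====

-- the two normalizations are the same function (branches written in opposite order)
theorem aNorm_eq_bNorm (e : List Char) : aNorm e = bNorm e := by
  by_cases h : PySem.Chars.endswith e ['\n', '\n'] = true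
  · simp [aNorm, bNorm, h]
  · simp [aNorm, bNorm, h]

-- the brace-balanced body: consumed characters (up to and including the closing
-- brace at depth d, or all of cs if it never closes) and the remainder
def braceD (c : Char) (d : Nat) : Nat :=
  if c = '{' then d + 1 else if c = '}' then d - 1 else d

def brace (cs : List Char) (d : Nat) : List Char × List Char :=
  match cs with
  | [] => ([], [])
  | c :: rest =>
    if braceD c d = 0 then ([c], rest)
    else (c :: (brace rest (braceD c d)).1, (brace rest (braceD c d)).2)

theorem brace_cons (c : Char) (rest : List Char) (d : Nat) :
    brace (c :: rest) d = if braceD c d = 0 then ([c], rest)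
      else (c :: (brace rest (braceD c d)).1, (brace rest (braceD c d)).2) := rfl

theorem braceD_lb (d : Nat) : braceD '{' d = d + 1 := by simp [braceD]
theorem braceD_rb (d : Nat) : braceD '}' d = d - 1 := by simp [braceD]
theorem braceD_other (c : Char) (d : Nat) (h1 : ¬ c = '{') (h2 : ¬ c = '}') :
    braceD c d = d := by simp [braceD, h1, h2]

theorem brace_append (cs : List Char) (d : Nat) :
    (brace cs d).1 ++ (brace cs d).2 = cs := by
  induction cs generalizing d with
  | nil => simp [brace]
  | cons c rest ih =>
    by_cases h : braceD c d = 0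
    · simp [brace, h]
    · simp [brace, h, ih (braceD c d)]

theorem brace_rest_length (cs : List Char) (d : Nat) :
    (brace cs d).2.length ≤ cs.length := by
  have := congrArg List.length (brace_append cs d)
  simp at this
  omega

-- common functional specification of both programs
def go (cs : List Char) : List (List Char) :=
  match cs.dropWhile (· ≠ '@') with
  | [] => []
  | _ :: _ =>
    match hq : (cs.dropWhile (· ≠ '@')).dropWhile (· ≠ '{') with
    | [] => []
    | _ :: body =>
      bNorm ((cs.dropWhile (· ≠ '@')).takeWhile (· ≠ '{') ++ '{' :: (brace body 1).1)
        :: go (brace body 1).2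
termination_by cs.length
decreasing_by
  have h1 : (brace body 1).2.length ≤ body.length := brace_rest_length body 1
  have h2 := List.length_dropWhile_le (fun x => !decide (x = '{'))
    (List.dropWhile (fun x => !decide (x = '@')) cs)
  have h3 := List.length_dropWhile_le (fun x => !decide (x = '@')) cs
  have h4 := congrArg List.length hq
  simp at h4
  omega

theorem go_of_no_at (cs : List Char) (h : cs.dropWhile (· ≠ '@') = []) : go cs = [] := by
  rw [go, h]

theorem go_of_no_lb (cs : List Char) (h : (cs.dropWhile (· ≠ '@')).dropWhile (· ≠ '{') = []) :
    go cs = [] := by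
  rw [go]
  split
  · rfl
  · split
    · rfl
    · rename_i b body heq
      rw [h] at heq
      cases heq

theorem go_eq (cs : List Char) (b : Char) (body : List Char)
    (h : (cs.dropWhile (· ≠ '@')).dropWhile (· ≠ '{') = b :: body) :
    go cs = bNorm ((cs.dropWhile (· ≠ '@')).takeWhile (· ≠ '{') ++ '{' :: (brace body 1).1)
        :: go (brace body 1).2 := by
  rw [go]
  split
  · rename_i heq
    rw [heq] at h
    simp at h
  · split
    · rename_i heq
      rw [heq] at h
      cases h
    · rename_i b' body' heq
      rw [h] at heq
      injection heq with h1 h2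
      rw [h2]

-- general list facts specialised to this file's predicates
theorem dw_drop (p : Char → Bool) (l : List Char) :
    l.dropWhile p = l.drop (l.takeWhile p).length := by
  calc l.dropWhile p
      = List.drop (l.takeWhile p).length (l.takeWhile p ++ l.dropWhile p) :=
        (List.drop_left).symm
    _ = l.drop (l.takeWhile p).length := by rw [List.takeWhile_append_dropWhile]

theorem pfx_single (c x : Char) (l : List Char) : [c] <+: x :: l ↔ x = c := by
  constructor
  · rintro ⟨t, ht⟩
    have := congrArg List.head? ht
    simpa using this.symm
  · rintro rfl; exact ⟨l, rfl⟩

theorem dw_head (p : Char → Bool) (l : List Char) (x : Char) (t : List Char)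
    (h : l.dropWhile p = x :: t) : p x = false := by
  have := List.head?_dropWhile_not p l
  rw [h] at this
  simpa using this

theorem takeWhile_len_of (l : List Char) (c : Char) (m : Nat)
    (h1 : [c] <+: l.drop m) (h2 : ∀ i < m, ¬ [c] <+: l.drop i) :
    (l.takeWhile (fun x => decide (x ≠ c))).length = m := by
  induction l generalizing m with
  | nil =>
    rw [List.drop_nil] at h1
    rcases h1 with ⟨t, ht⟩; cases ht
  | cons x t ih =>
    cases m with
    | zero =>
      rw [List.drop_zero] at h1
      have hx : x = c := (pfx_single c x t).1 h1
      simp [hx]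
    | succ m =>
      have hx : ¬ x = c := by
        intro hxc
        exact h2 0 (Nat.succ_pos m) (by rw [List.drop_zero]; exact (pfx_single c x t).2 hxc)
      have ht := ih m (by simpa using h1) (fun i hi => by
        have := h2 (i + 1) (Nat.succ_lt_succ hi)
        simpa using this)
      simp only [ne_eq, decide_not] at ht ⊢
      simp [hx, ht]

-- s.find(single char) as takeWhile length
theorem find_singleton (l : List Char) (c : Char) :
    PySem.Chars.find l [c] =
      if c ∈ l then ((l.takeWhile (fun x => decide (x ≠ c))).length : Int) else -1 := by
  by_cases hm : c ∈ l
  · have hne : PySem.Chars.find l [c] ≠ -1 := by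
      rw [Ne, PySem.Chars.find_eq_neg_one_iff, List.singleton_infix_iff]
      exact not_not_intro hm
    have hz : PySem.Chars.findFrom l [c] ((0 : Nat) : Int) = PySem.Chars.find l [c] := by
      norm_num [PySem.Chars.findFrom_zero]
    have hspec := PySem.Chars.findFrom_natCast_spec l [c] 0 (Nat.zero_le _) (by rw [hz]; exact hne)
    rw [hz] at hspec
    have h0 : (0 : Int) ≤ PySem.Chars.find l [c] := by exact_mod_cast hspec.1
    have hpre := hspec.2.1
    have hmin := fun i hi => hspec.2.2 i (Nat.zero_le _) hi
    rw [if_pos hm, ← Int.toNat_of_nonneg h0]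
    have := takeWhile_len_of l c (PySem.Chars.find l [c]).toNat hpre hmin
    exact_mod_cast congrArg (fun n : Nat => (n : Int)) this.symm
  · rw [if_neg hm]
    rw [PySem.Chars.find_eq_neg_one_iff, List.singleton_infix_iff]
    exact hm

theorem aInner_le (cs : List Char) (n j : Nat) (d : Int) (h : j ≤ n) :
    aInner cs n j d ≤ n := by
  rw [aInner]
  split
  · rename_i hg
    exact aInner_le cs n (j + 1) _ hg.1
  · exact h
termination_by n - j

-- A's inner loop computes exactly `brace` on the list tail
theorem aInner_eq (cs : List Char) (j : Nat) (dn : Nat) (hd : 1 ≤ dn) :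
    aInner cs cs.length j (dn : Int) = j + (brace (cs.drop j) dn).1.length ∧
    cs.drop (aInner cs cs.length j (dn : Int)) = (brace (cs.drop j) dn).2 := by
  by_cases hj : j < cs.length ∧ (0 : Int) < (dn : Int)
  · have hjl : j < cs.length := hj.1
    have hc : PySem.List.pyGetD cs (j : Int) ' ' = cs[j] :=
      PySem.List.pyGetD_eq_getElem cs ' ' (by exact_mod_cast Nat.zero_le j) (by exact_mod_cast hjl)
    have hdrop : cs.drop j = cs[j] :: cs.drop (j + 1) := List.drop_eq_getElem_cons hjl
    rw [aInner, dif_pos hj]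
    simp only [hc]
    by_cases h1 : cs[j] = '{'
    · have ih := aInner_eq cs (j + 1) (dn + 1) (by omega)
      have hcast : ((dn + 1 : Nat) : Int) = (dn : Int) + 1 := by push_cast; ring
      rw [hcast] at ih
      simp only [hdrop, h1, brace_cons, braceD_lb, if_true, reduceIte,
        if_neg (show ¬ dn + 1 = 0 by omega)]
      refine ⟨?_, ?_⟩
      · rw [ih.1]; simp; omega
      · exact ih.2
    · by_cases h2 : cs[j] = '}'
      · by_cases hdn : dn = 1
        · subst hdn
          have hz : (if cs[j] = '{' then ((1 : Nat) : Int) + 1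
              else if cs[j] = '}' then ((1 : Nat) : Int) - 1 else ((1 : Nat) : Int)) = 0 := by
            rw [if_neg h1, if_pos h2]; norm_num
          rw [hz]
          have hstop : aInner cs cs.length (j + 1) 0 = j + 1 := by
            rw [aInner, dif_neg (by omega)]
          rw [hstop]
          simp only [hdrop, h2, brace_cons, braceD_rb, if_true, reduceIte,
            if_neg (show ¬ ('}' : Char) = '{' by decide)]
          simp
        · have ih := aInner_eq cs (j + 1) (dn - 1) (by omega)
          have hcast : ((dn - 1 : Nat) : Int) = (dn : Int) - 1 := by omega
          rw [hcast] at ih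
          simp only [hdrop, h1, h2, if_neg h1, brace_cons, braceD_rb, if_true, reduceIte,
            if_neg (show ¬ ('}' : Char) = '{' by decide),
            if_neg (show ¬ dn - 1 = 0 by omega)]
          refine ⟨?_, ?_⟩
          · rw [ih.1]; simp; omega
          · exact ih.2
      · have ih := aInner_eq cs (j + 1) dn hd
        simp only [hdrop, if_neg h1, if_neg h2, brace_cons, braceD_other cs[j] dn h1 h2,
          if_neg (show ¬ dn = 0 by omega)]
        refine ⟨?_, ?_⟩
        · rw [ih.1]; simp; omega
        · exact ih.2
  · rw [aInner, dif_neg hj]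
    have hjl : cs.length ≤ j := by
      rcases Nat.lt_or_ge j cs.length with h | h
      · exact absurd ⟨h, by exact_mod_cast hd⟩ hj
      · exact h
    rw [List.drop_eq_nil_of_le hjl]
    simp [brace]
termination_by cs.length - j

def t₀ (cs : List Char) (i : Nat) : Nat :=
  ((cs.drop i).takeWhile (fun x => decide (x ≠ '@'))).length

def u₀ (cs : List Char) (i : Nat) : Nat :=
  (((cs.drop i).dropWhile (· ≠ '@')).takeWhile (fun x => decide (x ≠ '{'))).length

theorem aLoop_eq (cs : List Char) (i : Nat) (es : List (List Char)) (hi : i ≤ cs.length) :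
    aLoop cs i es = es ++ go (cs.drop i) := by
  by_cases h : i < cs.length
  · rw [aLoop, dif_pos h]
    have hfF := PySem.Chars.findFrom_natCast cs ['@'] i (le_of_lt h)
    by_cases hmem : '@' ∈ cs.drop i
    · -- '@' is found at index i + t
      have hfind := find_singleton (cs.drop i) '@'
      rw [if_pos hmem] at hfind
      have hat : PySem.Chars.findFrom cs ['@'] (i : Int) = ((i + t₀ cs i : Nat) : Int) := by
        rw [hfF, hfind]
        rw [if_neg (show ¬ ((((cs.drop i).takeWhile (fun x => decide (x ≠ '@'))).length : Int) = -1)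
          by omega)]
        unfold t₀; push_cast; ring
      have hdrop2 : cs.drop (i + t₀ cs i) = (cs.drop i).dropWhile (· ≠ '@') := by
        rw [dw_drop, ← List.drop_drop]
        rfl
      have hrne : (cs.drop i).dropWhile (· ≠ '@') ≠ [] := by
        intro hnil
        have := List.dropWhile_eq_nil_iff.1 hnil '@' hmem
        simp at this
      have hlen2 : i + t₀ cs i < cs.length := by
        by_contra hkk
        exact hrne (hdrop2 ▸ List.drop_eq_nil_of_le (by omega))
      have hfF2 := PySem.Chars.findFrom_natCast cs ['{'] (i + t₀ cs i) (le_of_lt hlen2)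
      simp only [hat]
      rw [dif_neg (by omega)]
      by_cases hmem2 : '{' ∈ (cs.drop i).dropWhile (· ≠ '@')
      · -- '{' found: one entry is produced and the loop continues after it
        have hfind2 : PySem.Chars.find (cs.drop (i + t₀ cs i)) ['{'] =
            ((((cs.drop i).dropWhile (· ≠ '@')).takeWhile (fun x => decide (x ≠ '{'))).length : Int) := by
          rw [hdrop2, find_singleton, if_pos hmem2]
        have hlb : PySem.Chars.findFrom cs ['{'] ((i + t₀ cs i : Nat) : Int) =
            ((i + t₀ cs i + u₀ cs i : Nat) : Int) := by
          rw [hfF2, hfind2, if_neg (by omega)]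
          unfold u₀; push_cast; ring
        simp only [hlb, Int.toNat_natCast]
        rw [dif_neg (by omega)]
        -- the text after the '{'
        have hq0 : ((cs.drop i).dropWhile (· ≠ '@')).dropWhile (· ≠ '{') =
            ((cs.drop i).dropWhile (· ≠ '@')).drop (u₀ cs i) := dw_drop _ _
        rcases hq1 : ((cs.drop i).dropWhile (· ≠ '@')).dropWhile (· ≠ '{') with _ | ⟨b, body⟩
        · exfalso
          have := List.dropWhile_eq_nil_iff.1 hq1 '{' hmem2
          simp at this
        · have hb : b = '{' := by
            have := dw_head _ _ b body hq1
            simpa using this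
          obtain ⟨bod, rst, hbr⟩ : ∃ x y, brace body 1 = (x, y) := ⟨_, _, rfl⟩
          have h1br : (brace body 1).1 = bod := by rw [hbr]
          have h2br : (brace body 1).2 = rst := by rw [hbr]
          have hbody : body = bod ++ rst := by
            conv_lhs => rw [← brace_append body 1]
            rw [h1br, h2br]
          have hdrop3 : cs.drop (i + t₀ cs i + u₀ cs i) = b :: body := by
            rw [← hq1, hq0, ← hdrop2, List.drop_drop]
          have hdrop4 : cs.drop (i + t₀ cs i + u₀ cs i + 1) = body := by
            have : cs.drop (i + t₀ cs i + u₀ cs i + 1) =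
                (cs.drop (i + t₀ cs i + u₀ cs i)).drop 1 := by
              rw [List.drop_drop]
            rw [this, hdrop3, List.drop_one, List.tail_cons]
          have hlen3 : i + t₀ cs i + u₀ cs i + 1 ≤ cs.length := by
            by_contra hkk
            rw [List.drop_eq_nil_of_le (by omega)] at hdrop3
            cases hdrop3
          have hone : ((1 : Nat) : Int) = (1 : Int) := by norm_num
          have hin := aInner_eq cs (i + t₀ cs i + u₀ cs i + 1) 1 le_rfl
          rw [hone, hdrop4] at hin
          have hjle : aInner cs cs.length (i + t₀ cs i + u₀ cs i + 1) 1 ≤ cs.length :=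
            aInner_le cs cs.length _ _ hlen3
          -- the produced entry, as a slice of the list
          have hslice : PySem.List.slice cs (some ((i + t₀ cs i : Nat) : Int))
              (some ((aInner cs cs.length (i + t₀ cs i + u₀ cs i + 1) 1 : Nat) : Int)) =
              ((cs.drop i).dropWhile (· ≠ '@')).takeWhile (· ≠ '{') ++ b :: (brace body 1).1 := by
            rw [PySem.List.slice_natCast, hdrop2]
            have harith : aInner cs cs.length (i + t₀ cs i + u₀ cs i + 1) 1 - (i + t₀ cs i) =
                u₀ cs i + (1 + (brace body 1).1.length) := by
              rw [hin.1]; omega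
            rw [harith]
            conv_lhs => rw [← List.takeWhile_append_dropWhile
              (p := fun x => decide (x ≠ '{')) (l := (cs.drop i).dropWhile (· ≠ '@'))]
            rw [hq1]
            have hu : u₀ cs i =
                (((cs.drop i).dropWhile (· ≠ '@')).takeWhile (fun x => decide (x ≠ '{'))).length :=
              rfl
            rw [hu, List.take_length_add_append]
            congr 1
            calc List.take (1 + (brace body 1).1.length) (b :: body)
                = b :: List.take ((brace body 1).1.length) body := by
                  rw [Nat.add_comm, List.take_succ_cons]
              _ = b :: (brace body 1).1 := by
                  congr 1
                  rw [h1br, hbody]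
                  exact List.take_left
          rw [hslice, if_neg (by simp)]
          rw [aLoop_eq cs (aInner cs cs.length (i + t₀ cs i + u₀ cs i + 1) 1) _ hjle]
          rw [hin.2]
          rw [go_eq (cs.drop i) b body hq1]
          rw [aNorm_eq_bNorm, hb]
          simp
      · -- no '{' after the '@': A breaks, go gives []
        have hfind2 : PySem.Chars.find (cs.drop (i + t₀ cs i)) ['{'] = -1 := by
          rw [hdrop2, find_singleton, if_neg hmem2]
        have hlbneg : PySem.Chars.findFrom cs ['{'] ((i + t₀ cs i : Nat) : Int) = -1 := by
          rw [hfF2, hfind2]; simp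
        rw [hlbneg, dif_pos rfl]
        rw [go_of_no_lb (cs.drop i) (List.dropWhile_eq_nil_iff.2 (by
          intro x hx
          simp only [ne_eq, decide_eq_true_eq]
          intro hxc
          exact hmem2 (hxc ▸ hx)))]
        simp
    · -- no '@' after i: A breaks with entries, go gives []
      have hfind := find_singleton (cs.drop i) '@'
      rw [if_neg hmem] at hfind
      have hatn : PySem.Chars.findFrom cs ['@'] (i : Int) = -1 := by
        rw [hfF, hfind]; simp
      simp only [hatn, dite_true]
      rw [go_of_no_at (cs.drop i) (List.dropWhile_eq_nil_iff.2 (by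
        intro x hx
        simp only [ne_eq, decide_eq_true_eq]
        intro hxc
        exact hmem (hxc ▸ hx)))]
      simp
  · rw [aLoop, dif_neg h]
    rw [List.drop_eq_nil_of_le (by omega)]
    rw [go_of_no_at [] rfl]
    simp
termination_by cs.length - i
decreasing_by
  have h1c := hin.1
  have hcc : aInner cs cs.length (i + t₀ cs i + u₀ cs i + 1) ((1 : Nat) : Int)
      = aInner cs cs.length (i + t₀ cs i + u₀ cs i + 1) (1 : Int) := by norm_num
  omega

def bFin (s : List (List Char) × List Char × Int × Nat) : List (List Char) :=
  if s.2.2.2 = 2 then s.1 ++ [bNorm s.2.1] else s.1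

theorem bStep0 (es : List (List Char)) (buf : List Char) (d : Int) (c : Char) :
    bStep (es, buf, d, 0) c = if c = '@' then (es, [c], d, 1) else (es, buf, d, 0) := rfl

theorem bStep1 (es : List (List Char)) (buf : List Char) (d : Int) (c : Char) :
    bStep (es, buf, d, 1) c =
      if c = '{' then (es, buf ++ [c], 1, 2) else (es, buf ++ [c], d, 1) := rfl

theorem bStep2 (es : List (List Char)) (buf : List Char) (d : Int) (c : Char) :
    bStep (es, buf, d, 2) c =
      if c = '{' then (es, buf ++ [c], d + 1, 2)
      else if c = '}' then
        (if d - 1 = 0 then (es ++ [bNorm (buf ++ [c])], buf ++ [c], d - 1, 0)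
         else (es, buf ++ [c], d - 1, 2))
      else (es, buf ++ [c], d, 2) := rfl

theorem go_cons_ne (c : Char) (cs : List Char) (hc : ¬ c = '@') : go (c :: cs) = go cs := by
  have hdw : (c :: cs).dropWhile (· ≠ '@') = cs.dropWhile (· ≠ '@') :=
    List.dropWhile_cons_of_pos (by simp [hc])
  conv_lhs => rw [go]
  conv_rhs => rw [go]
  rw [hdw]

theorem dw_at_cons (cs : List Char) : ('@' :: cs).dropWhile (· ≠ '@') = '@' :: cs :=
  List.dropWhile_cons_of_neg (by simp)

theorem bFold (n : Nat) : ∀ cs : List Char, cs.length ≤ n →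
    (∀ es buf (d : Int), bFin (cs.foldl bStep (es, buf, d, 0)) = es ++ go cs) ∧
    (∀ es buf (d : Int), bFin (cs.foldl bStep (es, buf, d, 1))
        = es ++ (match cs.dropWhile (· ≠ '{') with
          | [] => []
          | _ :: body =>
            bNorm (buf ++ cs.takeWhile (· ≠ '{') ++ '{' :: (brace body 1).1)
              :: go (brace body 1).2)) ∧
    (∀ es buf (dn : Nat), 1 ≤ dn →
      bFin (cs.foldl bStep (es, buf, (dn : Int), 2))
        = es ++ bNorm (buf ++ (brace cs dn).1) :: go (brace cs dn).2) := by
  induction n with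
  | zero =>
    intro cs hcs
    have hnil : cs = [] := List.eq_nil_of_length_eq_zero (Nat.le_zero.1 hcs)
    subst hnil
    refine ⟨?_, ?_, ?_⟩
    · intro es buf d
      rw [List.foldl_nil, go_of_no_at [] rfl]
      simp [bFin]
    · intro es buf d
      rw [List.foldl_nil]
      simp [bFin]
    · intro es buf dn _
      rw [List.foldl_nil]
      simp [bFin, brace, go_of_no_at [] rfl]
  | succ n ihn =>
    intro cs hcs
    cases cs with
    | nil => exact ihn [] (Nat.zero_le n)
    | cons c cs' =>
      have hlen : cs'.length ≤ n := by
        simp only [List.length_cons] at hcs; omega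
      obtain ⟨ih0, ih1, ih2⟩ := ihn cs' hlen
      refine ⟨?_, ?_, ?_⟩
      · -- state 0: searching for '@'
        intro es buf d
        rw [List.foldl_cons, bStep0]
        by_cases hc : c = '@'
        · rw [if_pos hc, ih1 es [c] d]
          subst hc
          have hdwa := dw_at_cons cs'
          have hdwb : ('@' :: cs').dropWhile (· ≠ '{') = cs'.dropWhile (· ≠ '{') :=
            List.dropWhile_cons_of_pos (by simp)
          have htwb : ('@' :: cs').takeWhile (· ≠ '{') = '@' :: cs'.takeWhile (· ≠ '{') :=
            List.takeWhile_cons_of_pos (by simp)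
          rcases hq : cs'.dropWhile (· ≠ '{') with _ | ⟨b, body⟩
          · rw [go_of_no_lb ('@' :: cs') (by rw [hdwa, hdwb, hq])]
          · rw [go_eq ('@' :: cs') b body (by rw [hdwa, hdwb, hq])]
            rw [hdwa, htwb]
            simp [hq]
        · rw [if_neg hc, ih0 es buf d, go_cons_ne c cs' hc]
      · -- state 1: after '@', before '{'
        intro es buf d
        rw [List.foldl_cons, bStep1]
        by_cases hc : c = '{'
        · rw [if_pos hc]
          have h1 : ((1 : Nat) : Int) = (1 : Int) := by norm_num
          have := ih2 es (buf ++ [c]) 1 le_rfl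
          rw [h1] at this
          rw [this]
          subst hc
          have hdw : ('{' :: cs').dropWhile (· ≠ '{') = '{' :: cs' :=
            List.dropWhile_cons_of_neg (by simp)
          rw [hdw]
          have htw : ('{' :: cs').takeWhile (· ≠ '{') = [] :=
            List.takeWhile_cons_of_neg (by simp)
          have hbr : brace ('{' :: cs') 1 = ('{' :: (brace cs' 2).1, (brace cs' 2).2) := by
            rw [brace_cons, braceD_lb, if_neg (by omega)]
          simp
        · rw [if_neg hc, ih1 es (buf ++ [c]) d]
          have hdw : (c :: cs').dropWhile (· ≠ '{') = cs'.dropWhile (· ≠ '{') :=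
            List.dropWhile_cons_of_pos (by simp [hc])
          have htw : (c :: cs').takeWhile (· ≠ '{') = c :: cs'.takeWhile (· ≠ '{') :=
            List.takeWhile_cons_of_pos (by simp [hc])
          rw [hdw, htw]
          rcases hq : cs'.dropWhile (· ≠ '{') with _ | ⟨b, body⟩
          · simp
          · simp
      · -- state 2: inside the braces
        intro es buf dn hdn
        rw [List.foldl_cons, bStep2]
        by_cases hc : c = '{'
        · rw [if_pos hc]
          have hcast : ((dn : Int) + 1) = ((dn + 1 : Nat) : Int) := by push_cast; ring
          rw [hcast, ih2 es (buf ++ [c]) (dn + 1) (by omega)]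
          subst hc
          rw [brace_cons, braceD_lb, if_neg (by omega)]
          simp
        · by_cases hc2 : c = '}'
          · rw [if_neg hc, if_pos hc2]
            by_cases hdn1 : dn = 1
            · subst hdn1
              rw [if_pos (by norm_num)]
              rw [ih0 (es ++ [bNorm (buf ++ [c])]) (buf ++ [c]) (((1 : Nat) : Int) - 1)]
              subst hc2
              rw [brace_cons, braceD_rb, if_pos (by norm_num)]
              simp
            · rw [if_neg (by
                intro hzz
                have : (dn : Int) = 1 := by omega
                exact hdn1 (by exact_mod_cast this))]
              have hcast : ((dn : Int) - 1) = ((dn - 1 : Nat) : Int) := by omega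
              rw [hcast, ih2 es (buf ++ [c]) (dn - 1) (by omega)]
              subst hc2
              rw [brace_cons, braceD_rb, if_neg (by omega)]
              simp
          · rw [if_neg hc, if_neg hc2, ih2 es (buf ++ [c]) dn hdn]
            rw [brace_cons, braceD_other c dn hc hc2, if_neg (by omega)]
            simp

-- ===== VERDICT (by name: the statement is the Claim_ definition above) =====
theorem split_bib_entries_spec : Claim_equal_split_bib_entries := by
  intro text _
  show split_bib_entries text = split_bib_entries_alt text
  have hA := aLoop_eq text.toList 0 [] (Nat.zero_le _)
  have hB := (bFold text.toList.length text.toList le_rfl).1 [] [] 0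
  simp only [List.drop_zero, List.nil_append] at hA hB
  show (aLoop text.toList 0 []).map (fun e => String.ofList e)
      = (bFin (text.toList.foldl bStep ([], [], 0, 0))).map (fun e => String.ofList e)
  rw [hA, hB]
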